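-- pv_equiv track=rewrite | github.com/pypi-data/pypi-mirror-386 | packages/eless/eless-1.0.0-py3-none-any.whl/eless/processing/streaming_processor.py | _find_good_break_point
-- ===== SOURCE A (Python) =====
-- def _find_good_break_point(text: str, min_position: int) -> int:
--     """
--     Find a good position to break text for processing.
--     Tries to break at paragraph or sentence boundaries.
--
--     Args:
--         text: Text to find break point in
--         min_position: Minimum position to consider for breaking
--
--     Returns:
--         Position to break at
--     """
--     # Look for paragraph breaks first
--     for i in range(min_position, len(text)):
--         if text[i : i + 2] == "\n\n":
--             return i + 2
--
--     # Look for sentence endings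
--     sentence_endings = ".!?"
--     for i in range(min_position, len(text)):
--         if text[i] in sentence_endings and i + 1 < len(text) and text[i + 1] == " ":
--             return i + 1
--
--     # Look for any whitespace
--     for i in range(min_position, len(text)):
--         if text[i].isspace():
--             return i
--
--     # Fallback to min_position
--     return min_position
-- ===== SOURCE B (Python) =====
-- def _find_good_break_point(text: str, min_position: int) -> int:
--     n = len(text)
--     sent_idx = None
--     ws_idx = None
--     for i in range(min_position, n):
--         if text[i : i + 2] == "\n\n":
--             return i + 2
--         c = text[i]
--         if sent_idx is None and c in ".!?" and i + 1 < n and text[i + 1] == " ":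
--             sent_idx = i
--         if ws_idx is None and c.isspace():
--             ws_idx = i
--     if sent_idx is not None:
--         return sent_idx + 1
--     if ws_idx is not None:
--         return ws_idx
--     return min_position
-- ===== Notes on version B (the rewrite author's own statement) =====
-- stated objective: alternative
-- what changed: Replaces A's three sequential scans of text (paragraph, then sentence ending, then whitespace) by a single scan that returns immediately on the first paragraph break while recording the first sentence-ending and first whitespace index for the fallbacks.
-- outside the precondition, e.g. on _find_good_break_point('\n\n', -5): A returns 2, B raises IndexError
import Mathlib
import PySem

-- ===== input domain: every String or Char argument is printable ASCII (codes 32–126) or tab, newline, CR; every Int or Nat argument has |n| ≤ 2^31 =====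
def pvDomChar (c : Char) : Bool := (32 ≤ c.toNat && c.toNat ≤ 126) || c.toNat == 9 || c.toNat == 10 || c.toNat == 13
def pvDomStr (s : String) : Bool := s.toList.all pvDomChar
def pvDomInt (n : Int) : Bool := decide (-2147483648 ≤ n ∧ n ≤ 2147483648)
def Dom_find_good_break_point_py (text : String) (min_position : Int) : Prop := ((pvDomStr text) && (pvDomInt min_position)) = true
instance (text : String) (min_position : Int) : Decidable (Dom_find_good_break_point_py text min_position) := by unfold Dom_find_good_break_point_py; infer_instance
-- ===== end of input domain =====

-- B replaces A's three sequential scans of the text by a single scan that records the first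
-- sentence-ending and the first whitespace index while looking for the first paragraph break
-- (objective: alternative one-pass decomposition; return value only, no side effects).

-- ===== PORT A =====
-- first loop: look for "\n\n" (text[i:i+2] never raises)
def fgbLoop1 (cs : List Char) : List Int → Option Int
  | [] => none
  | i :: rest =>
    if PySem.List.slice cs (some i) (some (i + 2)) = ['\n', '\n'] then some (i + 2)
    else fgbLoop1 cs rest

-- second loop: sentence ending followed by a space; pyGet? none = IndexError (outside Pre_)
def fgbLoop2 (cs : List Char) : List Int → Option Int
  | [] => none
  | i :: rest =>
    match PySem.List.pyGet? cs i with
    | none => some 0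
    | some c =>
      if (c = '.' ∨ c = '!' ∨ c = '?') ∧ i + 1 < (cs.length : Int) ∧
          PySem.List.pyGet? cs (i + 1) = some ' ' then some (i + 1)
      else fgbLoop2 cs rest

-- third loop: any whitespace
def fgbLoop3 (cs : List Char) : List Int → Option Int
  | [] => none
  | i :: rest =>
    match PySem.List.pyGet? cs i with
    | none => some 0
    | some c => if PySem.Chars.isspace c then some i else fgbLoop3 cs rest

def find_good_break_point_py (text : String) (min_position : Int) : Int :=
  let cs := text.toList
  let idxs := PySem.List.pyRange min_position (cs.length : Int) 1
  match fgbLoop1 cs idxs with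
  | some r => r
  | none =>
    match fgbLoop2 cs idxs with
    | some r => r
    | none =>
      match fgbLoop3 cs idxs with
      | some r => r
      | none => min_position

-- ===== PORT B =====
-- single pass carrying the first sentence-ending index s and first whitespace index w
def fgbLoopB (cs : List Char) (mp : Int) : List Int → Option Int → Option Int → Int
  | [], s, w =>
    match s with
    | some j => j + 1
    | none =>
      match w with
      | some j => j
      | none => mp
  | i :: rest, s, w =>
    if PySem.List.slice cs (some i) (some (i + 2)) = ['\n', '\n'] then i + 2
    else
      match PySem.List.pyGet? cs i with
      | none => 0
      | some c =>
        let s' := if s = none ∧ (c = '.' ∨ c = '!' ∨ c = '?') ∧ i + 1 < (cs.length : Int) ∧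
            PySem.List.pyGet? cs (i + 1) = some ' ' then some i else s
        let w' := if w = none ∧ PySem.Chars.isspace c then some i else w
        fgbLoopB cs mp rest s' w'

def find_good_break_point_py_alt (text : String) (min_position : Int) : Int :=
  let cs := text.toList
  fgbLoopB cs min_position (PySem.List.pyRange min_position (cs.length : Int) 1) none none

-- ===== PRECONDITION & SPEC =====
-- Pre_ excludes min_position < -len(text): there Python's negative-index wraparound makes
-- text[i] raise IndexError in the scans (A only returns when a paragraph break is found by
-- the raise-free slice loop before any indexing happens, an accident B does not share).
def Pre_find_good_break_point_py (text : String) (min_position : Int) : Prop :=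
  -(text.toList.length : Int) ≤ min_position
instance (text : String) (min_position : Int) : Decidable (Pre_find_good_break_point_py text min_position) := by
  unfold Pre_find_good_break_point_py; infer_instance

def pvWitness_find_good_break_point_py : String × Int := ("Hi. Go\n\nnow", 0)

def Spec_find_good_break_point_py (text : String) (min_position : Int) (out : Int) : Prop := out = find_good_break_point_py_alt text min_position
instance (text : String) (min_position : Int) (out : Int) : Decidable (Spec_find_good_break_point_py text min_position out) := by unfold Spec_find_good_break_point_py; infer_instance

-- ===== CLAIM (what is proved, stated in full; the proofs are below) =====
def Claim_equal_find_good_break_point_py : Prop := ∀ (text : String) (min_position : Int), Dom_find_good_break_point_py text min_position → Pre_find_good_break_point_py text min_position → Spec_find_good_break_point_py text min_position (find_good_break_point_py text min_position)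

-- ===== LEMMAS AND PROOFS =====

theorem fgbLoopB_eq (cs : List Char) (mp : Int) (l : List Int)
    (h : ∀ i ∈ l, (PySem.List.pyGet? cs i).isSome) (s w : Option Int) :
    fgbLoopB cs mp l s w =
      match fgbLoop1 cs l with
      | some r => r
      | none =>
        match s with
        | some j => j + 1
        | none =>
          match fgbLoop2 cs l with
          | some r => r
          | none =>
            match w with
            | some j => j
            | none =>
              match fgbLoop3 cs l with
              | some r => r
              | none => mp := by
  induction l generalizing s w with
  | nil => cases s <;> cases w <;> simp [fgbLoopB, fgbLoop1, fgbLoop2, fgbLoop3]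
  | cons i rest ih =>
    have hi : (PySem.List.pyGet? cs i).isSome := h i (by simp)
    obtain ⟨c, hc⟩ := Option.isSome_iff_exists.mp hi
    by_cases hp : PySem.List.slice cs (some i) (some (i + 2)) = ['\n', '\n']
    · simp [fgbLoopB, fgbLoop1, hp]
    · rw [show fgbLoopB cs mp (i :: rest) s w = fgbLoopB cs mp rest
        (if s = none ∧ (c = '.' ∨ c = '!' ∨ c = '?') ∧ i + 1 < (cs.length : Int) ∧
            PySem.List.pyGet? cs (i + 1) = some ' ' then some i else s)
        (if w = none ∧ PySem.Chars.isspace c then some i else w) by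
          simp [fgbLoopB, hp, hc]]
      rw [ih (fun j hj => h j (by simp [hj]))]
      have h1 : fgbLoop1 cs (i :: rest) = fgbLoop1 cs rest := by simp [fgbLoop1, hp]
      rw [h1]
      cases hL1 : fgbLoop1 cs rest with
      | some r => cases s <;> cases w <;> simp
      | none =>
        cases s with
        | some j => simp
        | none =>
          by_cases hs : (c = '.' ∨ c = '!' ∨ c = '?') ∧ i + 1 < (cs.length : Int) ∧
              PySem.List.pyGet? cs (i + 1) = some ' '
          · simp [fgbLoop2, hc, hs]
          · have h2 : fgbLoop2 cs (i :: rest) = fgbLoop2 cs rest := by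
              simp only [fgbLoop2, hc]; rw [if_neg hs]
            simp only [h2]
            cases hL2 : fgbLoop2 cs rest with
            | some r => cases w <;> simp [hs]
            | none =>
              cases w with
              | some j => simp [hs]
              | none =>
                by_cases hw : PySem.Chars.isspace c
                · simp [fgbLoop3, hc, hw, hs]
                · have h3 : fgbLoop3 cs (i :: rest) = fgbLoop3 cs rest := by
                    simp [fgbLoop3, hc, hw]
                  simp [hw, hs, h3]

-- ===== VERDICT (by name: the statement is the Claim_ definition above) =====
theorem find_good_break_point_py_spec : Claim_equal_find_good_break_point_py := by
  intro text mp _ hpre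
  unfold Spec_find_good_break_point_py find_good_break_point_py find_good_break_point_py_alt
  rw [fgbLoopB_eq]
  intro i hi
  rw [PySem.List.mem_pyRange_one] at hi
  rw [Option.isSome_iff_ne_none]
  intro hnone
  rw [PySem.List.pyGet?_eq_none_iff] at hnone
  exact hnone ⟨by exact le_trans hpre hi.1, hi.2⟩
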